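-- pv_equiv track=rewrite | github.com/daruma0411-crypto/pc-compat-engine | scripts/bequiet_psu_test.py | _build_connectors
-- ===== SOURCE A (Python) =====
-- def _build_connectors(spec: dict) -> str:
--     """スペック辞書からコネクターサマリー文字列を生成"""
--     parts = []
--     check = "\u2713"  # ✓
--
--     atx = spec.get("ATX -Motherboard ( 20+4-pin )", "").strip()
--     if atx and atx not in ("-", ""):
--         parts.append(f"{atx}x 24-pin")
--
--     for label in ("P8  (CPU)", "P8 (CPU)"):
--         val = spec.get(label, "").strip()
--         if val and val not in ("-", ""):
--             parts.append(f"{val}x 8-pin CPU")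
--             break
--
--     for label in ("P4 +4 (CPU)", "P4+4 (CPU)"):
--         val = spec.get(label, "").strip()
--         if val and val not in ("-", ""):
--             parts.append(f"{val}x 4+4-pin CPU")
--             break
--
--     pcie_8 = spec.get("12V-2x6 cables", "").strip()
--     if pcie_8 and pcie_8 not in ("-", ""):
--         parts.append(f"{pcie_8}x 12V-2x6(PCIe)")
--
--     pcie_6p2 = spec.get("PCI-e 6+2-pin ( GPU )", "").strip()
--     if pcie_6p2 and pcie_6p2 not in ("-", ""):
--         parts.append(f"{pcie_6p2}x 6+2-pin PCIe")
--
--     pcie_6 = spec.get("PCI-e 6-pin ( GPU )", "").strip()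
--     if pcie_6 and pcie_6 not in ("-", ""):
--         parts.append(f"{pcie_6}x 6-pin PCIe")
--
--     sata = spec.get("SATA", "").strip()
--     if sata and sata not in ("-", ""):
--         parts.append(f"{sata}x SATA")
--
--     return ", ".join(parts) if parts else ""
-- ===== SOURCE B (Python) =====
-- # Inverted-index rewrite: one pass over the spec items with a key->(slot, priority)
-- # index fills a 7-slot best-value array; a second tiny pass formats the slots in order.
-- # (A instead performs nine per-label lookups into the spec, one unrolled block per slot.)
--
-- _SLOT_SUFFIX = [
--     "x 24-pin",
--     "x 8-pin CPU",
--     "x 4+4-pin CPU",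
--     "x 12V-2x6(PCIe)",
--     "x 6+2-pin PCIe",
--     "x 6-pin PCIe",
--     "x SATA",
-- ]
--
-- _KEY_SLOT = {
--     "ATX -Motherboard ( 20+4-pin )": (0, 0),
--     "P8  (CPU)": (1, 0),
--     "P8 (CPU)": (1, 1),
--     "P4 +4 (CPU)": (2, 0),
--     "P4+4 (CPU)": (2, 1),
--     "12V-2x6 cables": (3, 0),
--     "PCI-e 6+2-pin ( GPU )": (4, 0),
--     "PCI-e 6-pin ( GPU )": (5, 0),
--     "SATA": (6, 0),
-- }
--
--
-- def _build_connectors(spec: dict) -> str: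
--     best = [None] * 7
--     for k, v in spec.items():
--         sp = _KEY_SLOT.get(k)
--         if sp is None:
--             continue
--         slot, prio = sp
--         w = v.strip()
--         if w and w != "-" and (best[slot] is None or prio < best[slot][0]):
--             best[slot] = (prio, w)
--     return ", ".join(b[1] + suf for b, suf in zip(best, _SLOT_SUFFIX) if b is not None)
-- ===== Notes on version B (the rewrite author's own statement) =====
-- stated objective: alternative
-- what changed: Instead of A's nine per-label first-match lookups into the spec with seven unrolled blocks, B makes a single pass over the spec items, dispatching each key through an inverted key->(slot,priority) index into a 7-slot best-value array, then formats the filled slots in order.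
import Mathlib
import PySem

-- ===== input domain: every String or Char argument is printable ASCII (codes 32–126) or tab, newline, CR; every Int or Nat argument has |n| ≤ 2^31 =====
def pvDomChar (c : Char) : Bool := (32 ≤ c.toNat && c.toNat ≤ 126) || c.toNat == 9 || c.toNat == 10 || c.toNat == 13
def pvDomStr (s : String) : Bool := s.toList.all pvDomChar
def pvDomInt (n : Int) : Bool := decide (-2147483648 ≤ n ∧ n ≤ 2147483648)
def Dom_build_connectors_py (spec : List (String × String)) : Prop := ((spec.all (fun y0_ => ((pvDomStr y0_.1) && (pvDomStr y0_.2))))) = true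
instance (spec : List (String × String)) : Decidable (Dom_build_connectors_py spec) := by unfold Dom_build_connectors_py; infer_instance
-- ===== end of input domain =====

-- B replaces A's nine per-label lookups + seven unrolled blocks by one pass over the
-- spec items through an inverted key→(slot,priority) index into a 7-slot array
-- (objective: alternative traversal, same cost).

-- spec.get(k, "") on the association list (lookup = first match)
def pvSpecGet (spec : List (String × String)) (k : String) : String :=
  ((spec.find? (fun p => p.1 == k)).map (·.2)).getD ""

-- ===== PORT A =====
-- A's `for label in (…): … break` loop, transliterated
def pvLoopA (spec : List (String × String)) (labels : List String) (suffix : String)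
    (parts : List String) : List String :=
  match labels with
  | [] => parts
  | l :: rest =>
    let val := PySem.Str.strip (pvSpecGet spec l)
    if val ≠ "" ∧ val ≠ "-" then parts ++ [val ++ suffix]
    else pvLoopA spec rest suffix parts

def build_connectors_py (spec : List (String × String)) : String :=
  let parts : List String := []
  let atx := PySem.Str.strip (pvSpecGet spec "ATX -Motherboard ( 20+4-pin )")
  let parts := if atx ≠ "" ∧ atx ≠ "-" then parts ++ [atx ++ "x 24-pin"] else parts
  let parts := pvLoopA spec ["P8  (CPU)", "P8 (CPU)"] "x 8-pin CPU" parts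
  let parts := pvLoopA spec ["P4 +4 (CPU)", "P4+4 (CPU)"] "x 4+4-pin CPU" parts
  let pcie8 := PySem.Str.strip (pvSpecGet spec "12V-2x6 cables")
  let parts := if pcie8 ≠ "" ∧ pcie8 ≠ "-" then parts ++ [pcie8 ++ "x 12V-2x6(PCIe)"] else parts
  let pcie6p2 := PySem.Str.strip (pvSpecGet spec "PCI-e 6+2-pin ( GPU )")
  let parts := if pcie6p2 ≠ "" ∧ pcie6p2 ≠ "-" then parts ++ [pcie6p2 ++ "x 6+2-pin PCIe"] else parts
  let pcie6 := PySem.Str.strip (pvSpecGet spec "PCI-e 6-pin ( GPU )")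
  let parts := if pcie6 ≠ "" ∧ pcie6 ≠ "-" then parts ++ [pcie6 ++ "x 6-pin PCIe"] else parts
  let sata := PySem.Str.strip (pvSpecGet spec "SATA")
  let parts := if sata ≠ "" ∧ sata ≠ "-" then parts ++ [sata ++ "x SATA"] else parts
  if parts ≠ [] then PySem.Str.join ", " parts else ""

-- ===== PORT B =====
def pvSlotSuffix : List String :=
  ["x 24-pin", "x 8-pin CPU", "x 4+4-pin CPU", "x 12V-2x6(PCIe)",
   "x 6+2-pin PCIe", "x 6-pin PCIe", "x SATA"]

-- _KEY_SLOT.get(k): B's constant dict, ported as the equivalent literal lookup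
def pvKeySlot (k : String) : Option (Nat × Nat) :=
  if k = "ATX -Motherboard ( 20+4-pin )" then some (0, 0)
  else if k = "P8  (CPU)" then some (1, 0)
  else if k = "P8 (CPU)" then some (1, 1)
  else if k = "P4 +4 (CPU)" then some (2, 0)
  else if k = "P4+4 (CPU)" then some (2, 1)
  else if k = "12V-2x6 cables" then some (3, 0)
  else if k = "PCI-e 6+2-pin ( GPU )" then some (4, 0)
  else if k = "PCI-e 6-pin ( GPU )" then some (5, 0)
  else if k = "SATA" then some (6, 0)
  else none

-- `best[slot] is None or prio < best[slot][0]`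
def pvBeats (o : Option (Nat × String)) (prio : Nat) : Bool :=
  match o with
  | none => true
  | some b => prio < b.1

-- B's loop body: one spec item updates the 7-slot array
def pvStep (best : List (Option (Nat × String))) (kv : String × String) :
    List (Option (Nat × String)) :=
  match pvKeySlot kv.1 with
  | none => best
  | some sp =>
    let w := PySem.Str.strip kv.2
    if (w ≠ "" ∧ w ≠ "-") ∧ pvBeats (best.getD sp.1 none) sp.2 = true
    then best.set sp.1 (some (sp.2, w)) else best

def build_connectors_py_alt (spec : List (String × String)) : String :=
  let best := spec.foldl pvStep (List.replicate 7 none)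
  PySem.Str.join ", "
    ((best.zip pvSlotSuffix).filterMap (fun bs => bs.1.map (fun b => b.2 ++ bs.2)))

-- ===== PRECONDITION & SPEC =====
def pvLabels : List String :=
  ["ATX -Motherboard ( 20+4-pin )", "P8  (CPU)", "P8 (CPU)", "P4 +4 (CPU)", "P4+4 (CPU)",
   "12V-2x6 cables", "PCI-e 6+2-pin ( GPU )", "PCI-e 6-pin ( GPU )", "SATA"]

-- Pre_ excludes association lists in which a connector label occurs twice: they do not
-- represent any Python dict (A's parameter), and A's first-match reading of such a list
-- vs B's scan is anybody's choice. Every real dict satisfies Pre_.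
def Pre_build_connectors_py (spec : List (String × String)) : Prop :=
  ((spec.map Prod.fst).filter (fun k => k ∈ pvLabels)).Nodup
instance (spec : List (String × String)) : Decidable (Pre_build_connectors_py spec) := by
  unfold Pre_build_connectors_py; infer_instance

def pvWitness_build_connectors_py : (List (String × String)) := [("SATA", "2"), ("Model", "X")]

def Spec_build_connectors_py (spec : List (String × String)) (out : String) : Prop := out = build_connectors_py_alt spec
instance (spec : List (String × String)) (out : String) : Decidable (Spec_build_connectors_py spec out) := by unfold Spec_build_connectors_py; infer_instance

-- ===== CLAIM (what is proved, stated in full; the proofs are below) =====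
def Claim_equal_build_connectors_py : Prop := ∀ (spec : List (String × String)), Dom_build_connectors_py spec → Pre_build_connectors_py spec → Spec_build_connectors_py spec (build_connectors_py spec)

-- ===== LEMMAS AND PROOFS =====

-- per-slot view of B's loop body (proof helper)
def pvStepSlot (i : Nat) (o : Option (Nat × String)) (kv : String × String) :
    Option (Nat × String) :=
  match pvKeySlot kv.1 with
  | none => o
  | some sp =>
    if sp.1 = i then
      let w := PySem.Str.strip kv.2
      if (w ≠ "" ∧ w ≠ "-") ∧ pvBeats o sp.2 = true then some (sp.2, w) else o
    else o

theorem pvKeySlot_lt {k : String} {s p : Nat} (h : pvKeySlot k = some (s, p)) : s < 7 := by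
  unfold pvKeySlot at h
  split_ifs at h <;> simp_all <;> omega

theorem pvStep_length (best : List (Option (Nat × String))) (kv : String × String) :
    (pvStep best kv).length = best.length := by
  unfold pvStep
  rcases pvKeySlot kv.1 with _ | sp
  · rfl
  · dsimp only
    split_ifs <;> simp

theorem pvStep_getD (best : List (Option (Nat × String))) (kv : String × String)
    (i : Nat) (h7 : best.length = 7) (hi : i < 7) :
    (pvStep best kv).getD i none = pvStepSlot i (best.getD i none) kv := by
  unfold pvStep pvStepSlot
  rcases hks : pvKeySlot kv.1 with _ | sp
  · rfl
  · have hs : sp.1 < 7 := pvKeySlot_lt (k := kv.1) (s := sp.1) (p := sp.2) (by simpa using hks)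
    dsimp only
    by_cases hsi : sp.1 = i
    · subst hsi
      split_ifs with hc h2 <;> simp_all [List.getD, List.getElem?_set, h7]
    · split_ifs with hc
      · simp [List.getD, List.getElem?_set, hsi]
      · rfl

theorem foldl_pvStep_getD (spec : List (String × String))
    (best : List (Option (Nat × String))) (i : Nat)
    (h7 : best.length = 7) (hi : i < 7) :
    (spec.foldl pvStep best).getD i none = spec.foldl (pvStepSlot i) (best.getD i none) := by
  induction spec generalizing best with
  | nil => rfl
  | cons kv rest ih =>
    simp only [List.foldl_cons]
    rw [ih (pvStep best kv) (by rw [pvStep_length]; exact h7), pvStep_getD best kv i h7 hi]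

theorem foldl_pvStep_length (spec : List (String × String))
    (best : List (Option (Nat × String))) :
    (spec.foldl pvStep best).length = best.length := by
  induction spec generalizing best with
  | nil => rfl
  | cons kv rest ih => simp only [List.foldl_cons]; rw [ih, pvStep_length]

-- once a slot holds priority 0, nothing changes it
theorem foldl_slot_zero (i : Nat) (spec : List (String × String)) (w : String) :
    spec.foldl (pvStepSlot i) (some (0, w)) = some (0, w) := by
  induction spec with
  | nil => rfl
  | cons kv rest ih =>
    simp only [List.foldl_cons]
    have h : pvStepSlot i (some (0, w)) kv = some (0, w) := by
      unfold pvStepSlot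
      rcases pvKeySlot kv.1 with _ | sp
      · rfl
      · simp [pvBeats]
    rw [h, ih]

theorem pvSpecGet_nil (k : String) : pvSpecGet [] k = "" := rfl

theorem pv_strip_empty : PySem.Str.strip "" = "" := rfl

-- a label absent from the spec reads as ""
theorem pvSpecGet_not_mem (spec : List (String × String)) (k : String)
    (h : k ∉ spec.map Prod.fst) : pvSpecGet spec k = "" := by
  unfold pvSpecGet
  have hf : spec.find? (fun p => p.1 == k) = none := by
    rw [List.find?_eq_none]
    intro p hp
    simp only [beq_iff_eq]
    intro hpk
    exact h (List.mem_map.2 ⟨p, hp, hpk⟩)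
  simp [hf]

theorem pvSpecGet_cons_self {kv : String × String} (rest : List (String × String))
    {k : String} (h : kv.1 = k) : pvSpecGet (kv :: rest) k = kv.2 := by
  unfold pvSpecGet; simp [List.find?_cons, h]

theorem pvSpecGet_cons_ne {kv : String × String} (rest : List (String × String))
    {k : String} (h : ¬ kv.1 = k) : pvSpecGet (kv :: rest) k = pvSpecGet rest k := by
  unfold pvSpecGet
  rw [List.find?_cons_of_neg]
  simp [h]

theorem pre_cons {kv : String × String} {rest : List (String × String)}
    (h : Pre_build_connectors_py (kv :: rest)) : Pre_build_connectors_py rest := by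
  unfold Pre_build_connectors_py at *
  simp only [List.map_cons, List.filter_cons] at h
  split at h
  · exact (List.nodup_cons.1 h).2
  · exact h

theorem pre_head_not_mem {kv : String × String} {rest : List (String × String)}
    (h : Pre_build_connectors_py (kv :: rest)) (hl : kv.1 ∈ pvLabels) :
    kv.1 ∉ rest.map Prod.fst := by
  unfold Pre_build_connectors_py at h
  simp only [List.map_cons, List.filter_cons] at h
  rw [if_pos (by simpa using hl)] at h
  intro hm
  exact (List.nodup_cons.1 h).1 (List.mem_filter.2 ⟨hm, by simpa using hl⟩)

-- single-candidate slots: the scan computes exactly A's guarded lookup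
theorem slot_single (i : Nat) (key : String)
    (Hc : ∀ k sp, pvKeySlot k = some sp → (sp.1 = i ↔ k = key))
    (Hk : pvKeySlot key = some (i, 0))
    (Hl : key ∈ pvLabels) :
    ∀ spec, Pre_build_connectors_py spec →
      spec.foldl (pvStepSlot i) none =
        (if PySem.Str.strip (pvSpecGet spec key) ≠ "" ∧ PySem.Str.strip (pvSpecGet spec key) ≠ "-"
         then some (0, PySem.Str.strip (pvSpecGet spec key)) else none) := by
  intro spec
  induction spec with
  | nil => intro _; simp [pvSpecGet_nil, pv_strip_empty]
  | cons kv rest ih =>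
    intro hpre
    simp only [List.foldl_cons]
    by_cases hk : kv.1 = key
    · have hstep : pvStepSlot i none kv =
          (if PySem.Str.strip kv.2 ≠ "" ∧ PySem.Str.strip kv.2 ≠ "-"
           then some (0, PySem.Str.strip kv.2) else none) := by
        unfold pvStepSlot
        rw [hk, Hk]
        simp [pvBeats]
      rw [hstep, pvSpecGet_cons_self rest hk]
      by_cases hw : PySem.Str.strip kv.2 ≠ "" ∧ PySem.Str.strip kv.2 ≠ "-"
      · simp only [if_pos hw]
        exact foldl_slot_zero i rest _
      · simp only [if_neg hw]
        have hnotmem : key ∉ rest.map Prod.fst := by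
          have := pre_head_not_mem hpre (by rw [hk]; exact Hl)
          rwa [hk] at this
        rw [ih (pre_cons hpre), pvSpecGet_not_mem rest key hnotmem]
        simp [pv_strip_empty]
    · have hstep : pvStepSlot i none kv = none := by
        unfold pvStepSlot
        rcases hks : pvKeySlot kv.1 with _ | sp
        · rfl
        · have hni : ¬ sp.1 = i := fun hsi => hk ((Hc kv.1 sp hks).1 hsi)
          simp [hni]
      rw [hstep, pvSpecGet_cons_ne rest hk]
      exact ih (pre_cons hpre)

-- scan resumed after a priority-1 hit: only the priority-0 label can override
theorem slot_after_one (i : Nat) (key1 key2 : String)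
    (Hc : ∀ k sp, pvKeySlot k = some sp →
      (sp.1 = i ↔ (k = key1 ∧ sp.2 = 0) ∨ (k = key2 ∧ sp.2 = 1)))
    (Hk1 : pvKeySlot key1 = some (i, 0))
    (Hl1 : key1 ∈ pvLabels) :
    ∀ spec (w : String), Pre_build_connectors_py spec →
      spec.foldl (pvStepSlot i) (some (1, w)) =
        (if PySem.Str.strip (pvSpecGet spec key1) ≠ "" ∧ PySem.Str.strip (pvSpecGet spec key1) ≠ "-"
         then some (0, PySem.Str.strip (pvSpecGet spec key1)) else some (1, w)) := by
  intro spec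
  induction spec with
  | nil => intro w _; simp [pvSpecGet_nil, pv_strip_empty]
  | cons kv rest ih =>
    intro w hpre
    simp only [List.foldl_cons]
    by_cases hk : kv.1 = key1
    · have hstep : pvStepSlot i (some (1, w)) kv =
          (if PySem.Str.strip kv.2 ≠ "" ∧ PySem.Str.strip kv.2 ≠ "-"
           then some (0, PySem.Str.strip kv.2) else some (1, w)) := by
        unfold pvStepSlot
        rw [hk, Hk1]
        simp [pvBeats]
      rw [hstep, pvSpecGet_cons_self rest hk]
      by_cases hw : PySem.Str.strip kv.2 ≠ "" ∧ PySem.Str.strip kv.2 ≠ "-"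
      · simp only [if_pos hw]
        exact foldl_slot_zero i rest _
      · simp only [if_neg hw]
        have hnotmem : key1 ∉ rest.map Prod.fst := by
          have := pre_head_not_mem hpre (by rw [hk]; exact Hl1)
          rwa [hk] at this
        rw [ih w (pre_cons hpre), pvSpecGet_not_mem rest key1 hnotmem]
        simp [pv_strip_empty]
    · have hstep : pvStepSlot i (some (1, w)) kv = some (1, w) := by
        unfold pvStepSlot
        rcases hks : pvKeySlot kv.1 with _ | sp
        · rfl
        · by_cases hsi : sp.1 = i
          · rcases (Hc kv.1 sp hks).1 hsi with ⟨h1, _⟩ | ⟨_, hp⟩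
            · exact absurd h1 hk
            · simp [hsi, pvBeats, hp]
          · simp [hsi]
      rw [hstep, pvSpecGet_cons_ne rest hk]
      exact ih w (pre_cons hpre)

-- two-candidate slots: the scan computes exactly A's fallback chain
theorem slot_double (i : Nat) (key1 key2 : String)
    (Hc : ∀ k sp, pvKeySlot k = some sp →
      (sp.1 = i ↔ (k = key1 ∧ sp.2 = 0) ∨ (k = key2 ∧ sp.2 = 1)))
    (Hk1 : pvKeySlot key1 = some (i, 0)) (Hk2 : pvKeySlot key2 = some (i, 1))
    (Hl1 : key1 ∈ pvLabels) (Hl2 : key2 ∈ pvLabels) (hne : key1 ≠ key2) :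
    ∀ spec, Pre_build_connectors_py spec →
      spec.foldl (pvStepSlot i) none =
        (if PySem.Str.strip (pvSpecGet spec key1) ≠ "" ∧ PySem.Str.strip (pvSpecGet spec key1) ≠ "-"
         then some (0, PySem.Str.strip (pvSpecGet spec key1))
         else if PySem.Str.strip (pvSpecGet spec key2) ≠ "" ∧ PySem.Str.strip (pvSpecGet spec key2) ≠ "-"
         then some (1, PySem.Str.strip (pvSpecGet spec key2)) else none) := by
  intro spec
  induction spec with
  | nil => intro _; simp [pvSpecGet_nil, pv_strip_empty]
  | cons kv rest ih =>
    intro hpre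
    simp only [List.foldl_cons]
    by_cases hk1 : kv.1 = key1
    · have hne2 : ¬ kv.1 = key2 := by rw [hk1]; exact hne
      have hstep : pvStepSlot i none kv =
          (if PySem.Str.strip kv.2 ≠ "" ∧ PySem.Str.strip kv.2 ≠ "-"
           then some (0, PySem.Str.strip kv.2) else none) := by
        unfold pvStepSlot
        rw [hk1, Hk1]
        simp [pvBeats]
      rw [hstep, pvSpecGet_cons_self rest hk1, pvSpecGet_cons_ne rest hne2]
      by_cases hw : PySem.Str.strip kv.2 ≠ "" ∧ PySem.Str.strip kv.2 ≠ "-"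
      · simp only [if_pos hw]
        exact foldl_slot_zero i rest _
      · simp only [if_neg hw]
        have hnotmem : key1 ∉ rest.map Prod.fst := by
          have := pre_head_not_mem hpre (by rw [hk1]; exact Hl1)
          rwa [hk1] at this
        rw [ih (pre_cons hpre), pvSpecGet_not_mem rest key1 hnotmem]
        simp [pv_strip_empty]
    · by_cases hk2 : kv.1 = key2
      · have hstep : pvStepSlot i none kv =
            (if PySem.Str.strip kv.2 ≠ "" ∧ PySem.Str.strip kv.2 ≠ "-"
             then some (1, PySem.Str.strip kv.2) else none) := by
          unfold pvStepSlot
          rw [hk2, Hk2]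
          simp [pvBeats]
        rw [hstep, pvSpecGet_cons_self rest hk2, pvSpecGet_cons_ne rest hk1]
        by_cases hw : PySem.Str.strip kv.2 ≠ "" ∧ PySem.Str.strip kv.2 ≠ "-"
        · simp only [if_pos hw]
          exact slot_after_one i key1 key2 Hc Hk1 Hl1 rest _ (pre_cons hpre)
        · simp only [if_neg hw]
          have hnotmem : key2 ∉ rest.map Prod.fst := by
            have := pre_head_not_mem hpre (by rw [hk2]; exact Hl2)
            rwa [hk2] at this
          rw [ih (pre_cons hpre), pvSpecGet_not_mem rest key2 hnotmem]
          simp [pv_strip_empty]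
      · have hstep : pvStepSlot i none kv = none := by
          unfold pvStepSlot
          rcases hks : pvKeySlot kv.1 with _ | sp
          · rfl
          · have hni : ¬ sp.1 = i := by
              intro hsi
              rcases (Hc kv.1 sp hks).1 hsi with ⟨h, _⟩ | ⟨h, _⟩
              · exact hk1 h
              · exact hk2 h
            simp [hni]
        rw [hstep, pvSpecGet_cons_ne rest hk1, pvSpecGet_cons_ne rest hk2]
        exact ih (pre_cons hpre)

theorem join_comma_empty_rule (parts : List String) :
    (if parts ≠ [] then PySem.Str.join ", " parts else "") = PySem.Str.join ", " parts := by
  split_ifs with h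
  · rfl
  · simp at h
    subst h
    rfl

theorem list7_eq (l : List (Option (Nat × String))) (h : l.length = 7) :
    l = [l.getD 0 none, l.getD 1 none, l.getD 2 none, l.getD 3 none,
         l.getD 4 none, l.getD 5 none, l.getD 6 none] := by
  match l, h with
  | [a, b, c, d, e, f, g], _ => rfl

-- canonical per-slot contribution to the output list
def pvIf1 (spec : List (String × String)) (key suf : String) : List String :=
  if PySem.Str.strip (pvSpecGet spec key) ≠ "" ∧ PySem.Str.strip (pvSpecGet spec key) ≠ "-"
  then [PySem.Str.strip (pvSpecGet spec key) ++ suf] else []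

def pvIf2 (spec : List (String × String)) (k1 k2 suf : String) : List String :=
  if PySem.Str.strip (pvSpecGet spec k1) ≠ "" ∧ PySem.Str.strip (pvSpecGet spec k1) ≠ "-"
  then [PySem.Str.strip (pvSpecGet spec k1) ++ suf]
  else if PySem.Str.strip (pvSpecGet spec k2) ≠ "" ∧ PySem.Str.strip (pvSpecGet spec k2) ≠ "-"
  then [PySem.Str.strip (pvSpecGet spec k2) ++ suf] else []

theorem append_if_singleton (parts : List String) (c : Prop) [Decidable c] (x : String) :
    (if c then parts ++ [x] else parts) = parts ++ (if c then [x] else []) := by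
  split_ifs <;> simp

theorem loopA_pair (spec : List (String × String)) (k1 k2 suf : String) (parts : List String) :
    pvLoopA spec [k1, k2] suf parts = parts ++ pvIf2 spec k1 k2 suf := by
  simp only [pvLoopA, pvIf2]
  split_ifs <;> simp

-- A's unrolled blocks, as the concatenation of the seven slot contributions
theorem A_parts (spec : List (String × String)) :
    build_connectors_py spec =
      PySem.Str.join ", "
        (pvIf1 spec "ATX -Motherboard ( 20+4-pin )" "x 24-pin" ++
         pvIf2 spec "P8  (CPU)" "P8 (CPU)" "x 8-pin CPU" ++
         pvIf2 spec "P4 +4 (CPU)" "P4+4 (CPU)" "x 4+4-pin CPU" ++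
         pvIf1 spec "12V-2x6 cables" "x 12V-2x6(PCIe)" ++
         pvIf1 spec "PCI-e 6+2-pin ( GPU )" "x 6+2-pin PCIe" ++
         pvIf1 spec "PCI-e 6-pin ( GPU )" "x 6-pin PCIe" ++
         pvIf1 spec "SATA" "x SATA") := by
  unfold build_connectors_py
  rw [join_comma_empty_rule]
  simp only [loopA_pair, append_if_singleton]
  simp [pvIf1, pvIf2, List.append_assoc]

theorem optIf1 (c : Prop) [Decidable c] (w suf : String) :
    ((if c then some ((0 : Nat), w) else none).map (fun b => b.2 ++ suf)).toList =
      if c then [w ++ suf] else [] := by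
  split_ifs <;> rfl

theorem optIf2 (c1 c2 : Prop) [Decidable c1] [Decidable c2] (w1 w2 suf : String) :
    ((if c1 then some ((0 : Nat), w1) else if c2 then some (1, w2) else none).map
        (fun b => b.2 ++ suf)).toList =
      if c1 then [w1 ++ suf] else if c2 then [w2 ++ suf] else [] := by
  split_ifs <;> rfl

theorem filterMap_toList {α β : Type} (f : α → Option β) (x : α) (xs : List α) :
    List.filterMap f (x :: xs) = (f x).toList ++ List.filterMap f xs := by
  cases h : f x <;> simp [h]

-- B's scan result, as the same concatenation (needs Pre_: no duplicate labels)
set_option maxHeartbeats 2000000 in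
theorem B_parts (spec : List (String × String)) (hpre : Pre_build_connectors_py spec) :
    build_connectors_py_alt spec =
      PySem.Str.join ", "
        (pvIf1 spec "ATX -Motherboard ( 20+4-pin )" "x 24-pin" ++
         pvIf2 spec "P8  (CPU)" "P8 (CPU)" "x 8-pin CPU" ++
         pvIf2 spec "P4 +4 (CPU)" "P4+4 (CPU)" "x 4+4-pin CPU" ++
         pvIf1 spec "12V-2x6 cables" "x 12V-2x6(PCIe)" ++
         pvIf1 spec "PCI-e 6+2-pin ( GPU )" "x 6+2-pin PCIe" ++
         pvIf1 spec "PCI-e 6-pin ( GPU )" "x 6-pin PCIe" ++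
         pvIf1 spec "SATA" "x SATA") := by
  have h7 : (spec.foldl pvStep (List.replicate 7 none)).length = 7 := by
    rw [foldl_pvStep_length]; rfl
  have hslot : ∀ i, i < 7 →
      (spec.foldl pvStep (List.replicate 7 none)).getD i none =
        spec.foldl (pvStepSlot i) none := by
    intro i hi
    rw [foldl_pvStep_getD spec _ i rfl hi]
    congr 1
    interval_cases i <;> rfl
  unfold build_connectors_py_alt
  rw [list7_eq _ h7]
  rw [hslot 0 (by omega), hslot 1 (by omega), hslot 2 (by omega), hslot 3 (by omega),
      hslot 4 (by omega), hslot 5 (by omega), hslot 6 (by omega)]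
  rw [slot_single 0 "ATX -Motherboard ( 20+4-pin )"
        (by intro k sp h; obtain ⟨sl, pr⟩ := sp; revert h; unfold pvKeySlot; split_ifs <;> intro h <;> simp_all <;> omega)
        (by unfold pvKeySlot; simp)
        (by unfold pvLabels; simp) spec hpre,
      slot_double 1 "P8  (CPU)" "P8 (CPU)"
        (by intro k sp h; obtain ⟨sl, pr⟩ := sp; revert h; unfold pvKeySlot; split_ifs <;> intro h <;> simp_all <;> omega)
        (by unfold pvKeySlot; simp) (by unfold pvKeySlot; simp)
        (by unfold pvLabels; simp) (by unfold pvLabels; simp) (by simp) spec hpre,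
      slot_double 2 "P4 +4 (CPU)" "P4+4 (CPU)"
        (by intro k sp h; obtain ⟨sl, pr⟩ := sp; revert h; unfold pvKeySlot; split_ifs <;> intro h <;> simp_all <;> omega)
        (by unfold pvKeySlot; simp) (by unfold pvKeySlot; simp)
        (by unfold pvLabels; simp) (by unfold pvLabels; simp) (by simp) spec hpre,
      slot_single 3 "12V-2x6 cables"
        (by intro k sp h; obtain ⟨sl, pr⟩ := sp; revert h; unfold pvKeySlot; split_ifs <;> intro h <;> simp_all <;> omega)
        (by unfold pvKeySlot; simp)
        (by unfold pvLabels; simp) spec hpre,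
      slot_single 4 "PCI-e 6+2-pin ( GPU )"
        (by intro k sp h; obtain ⟨sl, pr⟩ := sp; revert h; unfold pvKeySlot; split_ifs <;> intro h <;> simp_all <;> omega)
        (by unfold pvKeySlot; simp)
        (by unfold pvLabels; simp) spec hpre,
      slot_single 5 "PCI-e 6-pin ( GPU )"
        (by intro k sp h; obtain ⟨sl, pr⟩ := sp; revert h; unfold pvKeySlot; split_ifs <;> intro h <;> simp_all <;> omega)
        (by unfold pvKeySlot; simp)
        (by unfold pvLabels; simp) spec hpre,
      slot_single 6 "SATA"
        (by intro k sp h; obtain ⟨sl, pr⟩ := sp; revert h; unfold pvKeySlot; split_ifs <;> intro h <;> simp_all <;> omega)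
        (by unfold pvKeySlot; simp)
        (by unfold pvLabels; simp) spec hpre]
  simp only [pvSlotSuffix, List.zip_cons_cons, List.zip_nil_right, filterMap_toList,
    List.filterMap_nil]
  simp only [optIf1, optIf2]
  congr 1
  simp [pvIf1, pvIf2, List.append_assoc]

-- ===== VERDICT (by name: the statement is the Claim_ definition above) =====
theorem build_connectors_py_spec : Claim_equal_build_connectors_py := by
  intro spec _ hpre
  show build_connectors_py spec = build_connectors_py_alt spec
  rw [A_parts spec, B_parts spec hpre]
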